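-- pv_equiv track=rewrite | github.com/acunab/Bootcamp_Python_2024 | Modulo_3/evaluacion/filtrando_datos.py | separar_nombres
-- ===== SOURCE A (Python) =====
-- def separar_nombres(nombres):
--     magos = []
--     cientificos = []
--     otros = []
--
--     for nombre in nombres:
--         if nombre in ["Harry Houdini", "David Blaine", "Teller"]:
--             magos.append(nombre)
--         elif nombre in ["Newton", "Hawking", "Einstein"]:
--             cientificos.append(nombre)
--         else:
--             otros.append(nombre)
--
--     return magos, cientificos, otros
-- ===== SOURCE B (Python) =====
-- MAGOS = {"Harry Houdini", "David Blaine", "Teller"}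
-- CIENTIFICOS = {"Newton", "Hawking", "Einstein"}
--
-- def separar_nombres(nombres):
--     magos = [n for n in nombres if n in MAGOS]
--     cientificos = [n for n in nombres if n in CIENTIFICOS]
--     otros = [n for n in nombres if n not in MAGOS and n not in CIENTIFICOS]
--     return magos, cientificos, otros
-- ===== Notes on version B (the rewrite author's own statement) =====
-- stated objective: simpler
-- what changed: Replaces the single dispatch loop with three mutable accumulators by three independent filtering passes over the input, one per output list, against constant membership sets.
import Mathlib
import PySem

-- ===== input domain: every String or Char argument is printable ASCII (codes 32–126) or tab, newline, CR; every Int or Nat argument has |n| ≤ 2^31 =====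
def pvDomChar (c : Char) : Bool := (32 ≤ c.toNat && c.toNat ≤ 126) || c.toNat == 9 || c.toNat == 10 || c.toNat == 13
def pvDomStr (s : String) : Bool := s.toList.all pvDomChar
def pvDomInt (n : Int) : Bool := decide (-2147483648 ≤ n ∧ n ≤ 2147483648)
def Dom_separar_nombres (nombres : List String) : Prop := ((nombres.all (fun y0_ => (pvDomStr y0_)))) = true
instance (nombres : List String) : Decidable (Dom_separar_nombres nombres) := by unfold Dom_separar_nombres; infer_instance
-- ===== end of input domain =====

-- B replaces A's single dispatch loop with three independent membership-filter passes; objective: simpler.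

-- ===== PORT A =====
-- A: one loop, dispatching each name into one of three accumulators (appending at the end).
def separar_nombres (nombres : List String) : List String × List String × List String :=
  nombres.foldl
    (fun acc nombre =>
      let (magos, cientificos, otros) := acc
      if nombre ∈ ["Harry Houdini", "David Blaine", "Teller"] then
        (magos ++ [nombre], cientificos, otros)
      else if nombre ∈ ["Newton", "Hawking", "Einstein"] then
        (magos, cientificos ++ [nombre], otros)
      else
        (magos, cientificos, otros ++ [nombre]))
    ([], [], [])

-- ===== PORT B =====
def pvMagos : PySem.Set String := PySem.Set.ofList ["Harry Houdini", "David Blaine", "Teller"]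
def pvCientificos : PySem.Set String := PySem.Set.ofList ["Newton", "Hawking", "Einstein"]

-- B: three independent filtering passes.
def separar_nombres_alt (nombres : List String) : List String × List String × List String :=
  (nombres.filter (fun n => n ∈ pvMagos),
   nombres.filter (fun n => n ∈ pvCientificos),
   nombres.filter (fun n => ¬ n ∈ pvMagos ∧ ¬ n ∈ pvCientificos))

-- ===== PRECONDITION & SPEC =====
def Spec_separar_nombres (nombres : List String) (out : List String × List String × List String) : Prop := out = separar_nombres_alt nombres
instance (nombres : List String) (out : List String × List String × List String) : Decidable (Spec_separar_nombres nombres out) := by unfold Spec_separar_nombres; infer_instance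

-- ===== CLAIM (what is proved, stated in full; the proofs are below) =====
def Claim_equal_separar_nombres : Prop := ∀ (nombres : List String), Dom_separar_nombres nombres → Spec_separar_nombres nombres (separar_nombres nombres)

-- ===== LEMMAS AND PROOFS =====

-- Loop invariant for A's fold: the result is the accumulator extended by the three filters.
theorem separar_foldl_inv (nombres m c o : List String) :
    nombres.foldl
      (fun acc nombre =>
        let (magos, cientificos, otros) := acc
        if nombre ∈ ["Harry Houdini", "David Blaine", "Teller"] then
          (magos ++ [nombre], cientificos, otros)
        else if nombre ∈ ["Newton", "Hawking", "Einstein"] then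
          (magos, cientificos ++ [nombre], otros)
        else
          (magos, cientificos, otros ++ [nombre]))
      (m, c, o)
    = (m ++ nombres.filter (fun n => n ∈ pvMagos),
       c ++ nombres.filter (fun n => n ∈ pvCientificos),
       o ++ nombres.filter (fun n => ¬ n ∈ pvMagos ∧ ¬ n ∈ pvCientificos)) := by
  have e1 : pvMagos = ["Harry Houdini", "David Blaine", "Teller"] := by decide
  have e2 : pvCientificos = ["Newton", "Hawking", "Einstein"] := by decide
  induction nombres generalizing m c o with
  | nil => simp
  | cons x xs ih =>
    rw [List.foldl_cons]
    show List.foldl _ (if x ∈ ["Harry Houdini", "David Blaine", "Teller"] then (m ++ [x], c, o)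
        else if x ∈ ["Newton", "Hawking", "Einstein"] then (m, c ++ [x], o)
        else (m, c, o ++ [x])) xs = _
    by_cases hm : x ∈ ["Harry Houdini", "David Blaine", "Teller"]
    · have b1 : x ∈ pvMagos := e1 ▸ hm
      have b2 : ¬ x ∈ pvCientificos := by rw [e2]; fin_cases hm <;> decide
      rw [if_pos hm, ih]
      simp [List.filter_cons, b1, b2]
    · have b1 : ¬ x ∈ pvMagos := e1 ▸ hm
      rw [if_neg hm]
      by_cases hc : x ∈ ["Newton", "Hawking", "Einstein"]
      · have b2 : x ∈ pvCientificos := e2 ▸ hc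
        rw [if_pos hc, ih]
        simp [List.filter_cons, b1, b2]
      · have b2 : ¬ x ∈ pvCientificos := e2 ▸ hc
        rw [if_neg hc, ih]
        simp [List.filter_cons, b1, b2]
-- ===== VERDICT (by name: the statement is the Claim_ definition above) =====
theorem separar_nombres_spec : Claim_equal_separar_nombres := by
  intro nombres _
  unfold Spec_separar_nombres separar_nombres separar_nombres_alt
  simpa using separar_foldl_inv nombres [] [] []
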